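-- pv_equiv track=rewrite | github.com/soh-123/LeetCode-solutions | 038_max_count_of_positive_and_negative/2529.maximum-count-of-positive-integer-and-negative-integer.py | maximumCount
-- ===== SOURCE A (Python) =====
-- def maximumCount(nums) -> int:
--     neg = 0
--     pos = 0
--     for i in nums:
--         if i < 0:
--             neg += 1
--         elif i > 0:
--             pos += 1
--     return max(neg, pos)
-- ===== SOURCE B (Python) =====
-- def _bisect_left(s, x):
--     lo = 0
--     hi = len(s)
--     while lo < hi:
--         mid = (lo + hi) // 2
--         if s[mid] < x:
--             lo = mid + 1
--         else:
--             hi = mid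
--     return lo
--
--
-- def _bisect_right(s, x):
--     lo = 0
--     hi = len(s)
--     while lo < hi:
--         mid = (lo + hi) // 2
--         if x < s[mid]:
--             hi = mid
--         else:
--             lo = mid + 1
--     return lo
--
--
-- def maximumCount(nums) -> int:
--     s = sorted(nums)
--     neg = _bisect_left(s, 0)
--     pos = len(s) - _bisect_right(s, 0)
--     return max(neg, pos)
-- ===== Notes on version B (the rewrite author's own statement) =====
-- stated objective: alternative
-- what changed: Replaces the single counting pass by sort-then-binary-search: sort the list, locate the zero boundary with bisect_left/bisect_right, and read both counts off the boundary positions.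
import Mathlib
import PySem

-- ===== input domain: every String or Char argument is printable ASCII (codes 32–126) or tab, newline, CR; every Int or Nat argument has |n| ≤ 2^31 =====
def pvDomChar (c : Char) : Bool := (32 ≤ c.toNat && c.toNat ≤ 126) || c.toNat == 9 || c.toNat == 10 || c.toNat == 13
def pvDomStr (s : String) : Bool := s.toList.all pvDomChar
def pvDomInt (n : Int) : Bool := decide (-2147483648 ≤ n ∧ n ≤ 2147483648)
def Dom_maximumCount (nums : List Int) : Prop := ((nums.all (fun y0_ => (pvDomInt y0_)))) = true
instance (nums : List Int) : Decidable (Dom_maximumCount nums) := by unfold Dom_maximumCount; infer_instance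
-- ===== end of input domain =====

-- B replaces A's single counting pass by sort-then-binary-search (bisect boundaries of 0
-- in the sorted copy); a genuinely different algorithm of similar cost, not claimed faster.


-- ===== PORT A =====
-- one pass: count negatives and positives, return the larger count
def maximumCount (nums : List Int) : Int :=
  let p := nums.foldl (fun (st : Int × Int) i =>
      if i < 0 then (st.1 + 1, st.2)
      else if i > 0 then (st.1, st.2 + 1)
      else st) (0, 0)
  max p.1 p.2

-- ===== PORT B =====
-- sort, then binary-search the boundary of 0; Source B's hand-written _bisect_left/_bisect_right
-- are the textbook lo/hi loops, which are exactly PySem.List.bisectLeft / bisectRight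
def maximumCount_alt (nums : List Int) : Int :=
  let s := PySem.List.sorted nums (fun x => x) false
  let neg : Nat := PySem.List.bisectLeft s 0
  let pos : Nat := s.length - PySem.List.bisectRight s 0   -- bisectRight ≤ length, so Nat '-' is Python's '-'
  max (neg : Int) (pos : Int)

-- ===== PRECONDITION & SPEC =====
def Spec_maximumCount (nums : List Int) (out : Int) : Prop := out = maximumCount_alt nums
instance (nums : List Int) (out : Int) : Decidable (Spec_maximumCount nums out) := by unfold Spec_maximumCount; infer_instance

-- ===== CLAIM (what is proved, stated in full; the proofs are below) =====
def Claim_equal_maximumCount : Prop := ∀ (nums : List Int), Dom_maximumCount nums → Spec_maximumCount nums (maximumCount nums)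

-- ===== LEMMAS AND PROOFS =====

-- A's fold counts negatives and positives
theorem pvFoldA (nums : List Int) (a b : Int) :
    nums.foldl (fun (st : Int × Int) i =>
      if i < 0 then (st.1 + 1, st.2)
      else if i > 0 then (st.1, st.2 + 1)
      else st) (a, b)
    = (a + (nums.countP (fun i => decide (i < 0)) : Int),
       b + (nums.countP (fun i => decide (0 < i)) : Int)) := by
  induction nums generalizing a b with
  | nil => simp
  | cons x xs ih =>
    simp only [List.foldl_cons, List.countP_cons]
    by_cases hx : x < 0
    · have hx' : ¬ (0 < x) := by omega
      simp [hx, hx', ih]; omega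
    · by_cases hp : 0 < x
      · simp [hx, hp, ih]; omega
      · simp [hx, hp, ih]

-- bisect_left of 0 in a sorted list is the number of negatives
theorem pvBL (s : List Int) (h : s.Pairwise (· ≤ ·)) :
    PySem.List.bisectLeft s 0 = s.countP (fun i => decide (i < 0)) := by
  obtain ⟨hle, hlt, hge⟩ := PySem.List.bisectLeft_spec s 0 h
  set k := PySem.List.bisectLeft s 0 with hk
  have hsplit : s = s.take k ++ s.drop k := (List.take_append_drop k s).symm
  symm
  have h1 : (s.take k).countP (fun i => decide (i < 0)) = (s.take k).length := by
    apply List.countP_eq_length.2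
    intro a ha
    obtain ⟨j, hj, rfl⟩ := List.getElem_of_mem ha |>.imp (fun j hj => hj)
    simp only [List.length_take] at hj
    rw [List.getElem_take]
    simp only [decide_eq_true_eq]
    exact hlt j (by omega) (by omega)
  have h2 : (s.drop k).countP (fun i => decide (i < 0)) = 0 := by
    apply List.countP_eq_zero.2
    intro a ha
    obtain ⟨j, hj, rfl⟩ := List.getElem_of_mem ha |>.imp (fun j hj => hj)
    simp only [List.length_drop] at hj
    rw [List.getElem_drop]
    simp only [decide_eq_true_eq, not_lt]
    exact hge (k + j) (by omega) (by omega)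
  calc s.countP (fun i => decide (i < 0))
      = (s.take k).countP _ + (s.drop k).countP _ := by
        conv_lhs => rw [hsplit]
        rw [List.countP_append]
    _ = (s.take k).length := by rw [h1, h2]; omega
    _ = k := by simp [List.length_take]; omega

-- length minus bisect_right of 0 is the number of positives
theorem pvBR (s : List Int) (h : s.Pairwise (· ≤ ·)) :
    s.length - PySem.List.bisectRight s 0 = s.countP (fun i => decide (0 < i)) := by
  obtain ⟨hle, hlt, hge⟩ := PySem.List.bisectRight_spec s 0 h
  set k := PySem.List.bisectRight s 0 with hk
  have hsplit : s = s.take k ++ s.drop k := (List.take_append_drop k s).symm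
  have h1 : (s.take k).countP (fun i => decide (0 < i)) = 0 := by
    apply List.countP_eq_zero.2
    intro a ha
    obtain ⟨j, hj, rfl⟩ := List.getElem_of_mem ha |>.imp (fun j hj => hj)
    simp only [List.length_take] at hj
    rw [List.getElem_take]
    simp only [decide_eq_true_eq, not_lt]
    exact hlt j (by omega) (by omega)
  have h2 : (s.drop k).countP (fun i => decide (0 < i)) = (s.drop k).length := by
    apply List.countP_eq_length.2
    intro a ha
    obtain ⟨j, hj, rfl⟩ := List.getElem_of_mem ha |>.imp (fun j hj => hj)
    simp only [List.length_drop] at hj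
    rw [List.getElem_drop]
    simp only [decide_eq_true_eq]
    exact hge (k + j) (by omega) (by omega)
  calc s.length - k
      = (s.drop k).length := by simp [List.length_drop]
    _ = (s.take k).countP _ + (s.drop k).countP _ := by rw [h1, h2]; omega
    _ = s.countP (fun i => decide (0 < i)) := by
        conv_rhs => rw [hsplit]
        rw [List.countP_append]

-- ===== VERDICT (by name: the statement is the Claim_ definition above) =====
theorem maximumCount_spec : Claim_equal_maximumCount := by
  intro nums _
  unfold Spec_maximumCount maximumCount maximumCount_alt
  have hperm : (PySem.List.sorted nums (fun x => x) false).Perm nums :=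
    PySem.List.sorted_perm nums (fun x => x) false
  have hpair : (PySem.List.sorted nums (fun x => x) false).Pairwise (· ≤ ·) := by
    have := PySem.List.sorted_pairwise nums (fun x => x)
    simpa using this
  simp only [pvFoldA,
    pvBL _ hpair, pvBR _ hpair,
    hperm.countP_eq, zero_add]
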